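-- pv_equiv track=rewrite | github.com/absognety/Competitive-Coding-Platforms | GFG_Publications/decryptString.py | encrypted_string
-- ===== SOURCE A (Python) =====
-- def encrypted_string(strg):
--     EncryptedString = [strg[0]]
--     for t in range(1,len(strg)):
--         if (t%2 == 1):
--             EncryptedString.append(strg[t])
--         else:
--             EncryptedString.insert(0,strg[t])
--     return (''.join(EncryptedString))
-- ===== SOURCE B (Python) =====
-- def encrypted_string(strg):
--     return strg[::2][::-1] + strg[1::2]
-- ===== Notes on version B (the rewrite author's own statement) =====
-- stated objective: faster
-- what changed: Replaces the per-character loop that appends or inserts at the front of a list by index parity with the closed slice formula strg[::2][::-1] + strg[1::2].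
import Mathlib
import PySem

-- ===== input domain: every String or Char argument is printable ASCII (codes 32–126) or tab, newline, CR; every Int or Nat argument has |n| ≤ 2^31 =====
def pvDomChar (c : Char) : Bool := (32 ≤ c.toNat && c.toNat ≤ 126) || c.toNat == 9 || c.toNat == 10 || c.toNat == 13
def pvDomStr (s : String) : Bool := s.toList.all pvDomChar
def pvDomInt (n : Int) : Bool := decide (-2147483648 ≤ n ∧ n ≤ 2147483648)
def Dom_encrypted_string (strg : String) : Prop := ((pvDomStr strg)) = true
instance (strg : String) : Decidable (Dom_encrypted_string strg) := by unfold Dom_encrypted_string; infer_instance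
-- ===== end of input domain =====

-- B replaces A's per-index loop (append / insert-at-front by index parity) by the slice
-- formula strg[::2][::-1] + strg[1::2]; equal wherever A returns (A raises IndexError on
-- the empty string, where B returns "").

-- ===== PORT A =====
def encrypted_string (strg : String) : String :=
  let cs := strg.toList
  match PySem.List.pyGet? cs 0 with
  | none => ""  -- IndexError on strg[0]: excluded by Pre_
  | some c0 =>
    let acc := (PySem.List.pyRange 1 (cs.length : Int) 1).foldl
      (fun acc t =>
        if PySem.Int.mod t 2 == 1 then acc ++ [PySem.List.pyGetD cs t ' ']
        else PySem.List.pyGetD cs t ' ' :: acc)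
      [c0]
    String.ofList acc

-- ===== PORT B =====
def encrypted_string_alt (strg : String) : String :=
  let cs := strg.toList
  let ev := (PySem.List.slice? cs none none 2).getD []        -- strg[::2]
  let evr := (PySem.List.slice? ev none none (-1)).getD []    -- …[::-1]
  let od := (PySem.List.slice? cs (some 1) none 2).getD []    -- strg[1::2]
  String.ofList (evr ++ od)

-- ===== PRECONDITION & SPEC =====
-- Pre_ excludes exactly the empty string, on which A raises IndexError at strg[0].
def Pre_encrypted_string (strg : String) : Prop := strg ≠ ""
instance (strg : String) : Decidable (Pre_encrypted_string strg) := by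
  unfold Pre_encrypted_string; infer_instance
def pvWitness_encrypted_string : String := "abcde"

def Spec_encrypted_string (strg : String) (out : String) : Prop := out = encrypted_string_alt strg
instance (strg : String) (out : String) : Decidable (Spec_encrypted_string strg out) := by
  unfold Spec_encrypted_string; infer_instance

-- ===== CLAIM =====
def Claim_equal_encrypted_string : Prop :=
  ∀ (strg : String), Dom_encrypted_string strg → Pre_encrypted_string strg →
    Spec_encrypted_string strg (encrypted_string strg)

-- ===== LEMMAS AND PROOFS =====

/-- Every other element (indices 0,2,4,…). -/
def pvEO : List Char → List Char
  | [] => []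
  | [x] => [x]
  | x :: _ :: t => x :: pvEO t

theorem pvEO_cons (c : Char) (l : List Char) : pvEO (c :: l) = c :: pvEO l.tail := by
  cases l <;> rfl

theorem pvEvensAux : ∀ (xs : List Char),
    (List.range ((xs.length + 1) / 2)).filterMap (fun k => xs[2 * k]?) = pvEO xs
  | [] => by simp [pvEO]
  | [x] => by simp [pvEO]
  | x :: y :: t => by
    have ih := pvEvensAux t
    have hc : ((x :: y :: t).length + 1) / 2 = (t.length + 1) / 2 + 1 := by
      simp [List.length]; omega
    rw [hc, List.range_succ_eq_map]
    simp only [List.filterMap_cons, List.filterMap_map]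
    have hf : ((fun k => (x :: y :: t)[2 * k]?) ∘ Nat.succ) = (fun k : Nat => t[2 * k]?) := by
      funext k
      have h2 : 2 * Nat.succ k = 2 * k + 1 + 1 := by omega
      simp [Function.comp, h2]
    rw [hf, ih]
    simp [pvEO]

theorem pvOddsAux (xs : List Char) :
    (List.range (xs.length / 2)).filterMap (fun k => xs[2 * k + 1]?) = pvEO xs.tail := by
  cases xs with
  | nil => simp [pvEO]
  | cons x rest =>
    have h : (x :: rest).length / 2 = (rest.length + 1) / 2 := by simp [List.length]
    rw [h]
    have hf : (fun k : Nat => (x :: rest)[2 * k + 1]?) = (fun k : Nat => rest[2 * k]?) := by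
      funext k; simp
    rw [hf, pvEvensAux]
    rfl

theorem pvSliceEvens (xs : List Char) : PySem.List.slice? xs none none 2 = some (pvEO xs) := by
  cases xs with
  | nil => decide
  | cons x l =>
    rw [← pvEvensAux (x :: l)]
    have hpos : (0 : Int) < ((x :: l).length : Int) := by
      simp
    simp only [PySem.List.slice?, PySem.List.sliceIndices]
    norm_num [hpos]
    have hC : ((((l.length : Int) + 1 + 2 - 1) / 2)).toNat = (l.length + 1 + 1) / 2 := by
      omega
    have hf : (fun k : Nat => (x :: l)[((2 : Int) * (k : Int)).toNat]?)
        = (fun k : Nat => (x :: l)[2 * k]?) := by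
      funext k
      have hi : ((2 : Int) * (k : Int)).toNat = 2 * k := by omega
      rw [hi]
    rw [hC, hf]

theorem pvSliceOdds (xs : List Char) :
    PySem.List.slice? xs (some 1) none 2 = some (pvEO xs.tail) := by
  cases xs with
  | nil => decide
  | cons x l =>
    rw [← pvOddsAux (x :: l)]
    have h1 : (1 : Int) ≤ ((x :: l).length : Int) := by
      simp
    simp only [PySem.List.slice?, PySem.List.sliceIndices]
    norm_num [h1]
    have hC : (if 0 < l.length then (((l.length : Int) + 2 - 1) / 2).toNat else 0)
        = (l.length + 1) / 2 := by
      split_ifs with hpos <;> omega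
    have hf : (fun k : Nat => (x :: l)[((1 : Int) + (2 : Int) * (k : Int)).toNat]?)
        = (fun k : Nat => l[2 * k]?) := by
      funext k
      have hi : ((1 : Int) + (2 : Int) * (k : Int)).toNat = 2 * k + 1 := by omega
      rw [hi]; simp
    rw [hC, hf]

theorem pvLoopA : ∀ (rest acc : List Char),
    (List.range rest.length).foldl
      (fun acc (k : Nat) =>
        if k % 2 == 0 then acc ++ [rest.getD k ' '] else rest.getD k ' ' :: acc) acc
    = (pvEO rest.tail).reverse ++ acc ++ pvEO rest
  | [], acc => by simp [pvEO]
  | [x], acc => by simp [pvEO]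
  | x :: y :: t, acc => by
    have ih := pvLoopA t (y :: (acc ++ [x]))
    have hc : (x :: y :: t).length = t.length + 1 + 1 := by simp
    rw [hc, List.range_succ_eq_map, List.range_succ_eq_map]
    simp only [List.map_cons, List.map_map, List.foldl_cons, List.foldl_map]
    have hf : ∀ (a : List Char) (k : Nat),
        (if (Nat.succ (Nat.succ k)) % 2 == 0 then a ++ [(x :: y :: t).getD (Nat.succ (Nat.succ k)) ' ']
         else (x :: y :: t).getD (Nat.succ (Nat.succ k)) ' ' :: a)
        = (if k % 2 == 0 then a ++ [t.getD k ' '] else t.getD k ' ' :: a) := by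
      intro a k
      have hm : (Nat.succ (Nat.succ k)) % 2 = k % 2 := by omega
      simp [hm]
    simp only [Function.comp, hf]
    have e0 : (0 % 2 == 0) = true := by decide
    have e1 : (Nat.succ 0 % 2 == 0) = false := by decide
    simp only [e0, e1, if_true, if_false, List.getD_cons_zero, List.getD_cons_succ,
      Bool.false_eq_true]
    rw [ih]
    simp only [pvEO_cons, pvEO, List.reverse_cons, List.tail_cons]
    simp [List.append_assoc]

theorem pvMain (strg : String) (h : strg.toList ≠ []) :
    encrypted_string strg = encrypted_string_alt strg := by
  cases hcs : strg.toList with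
  | nil => exact absurd hcs h
  | cons c0 rest =>
    simp only [encrypted_string, encrypted_string_alt, hcs,
      PySem.List.pyGet?_zero_cons, pvSliceEvens, pvSliceOdds,
      PySem.List.slice?_none_none_neg_one, Option.getD_some]
    rw [PySem.List.pyRange_one]
    have hlen : ((((c0 :: rest).length : Int) - 1)).toNat = rest.length := by
      simp
    rw [hlen, List.foldl_map]
    have hbody : (fun (acc : List Char) (k : Nat) =>
        if PySem.Int.mod (1 + (k : Int)) 2 == 1 then
          acc ++ [PySem.List.pyGetD (c0 :: rest) (1 + (k : Int)) ' ']
        else PySem.List.pyGetD (c0 :: rest) (1 + (k : Int)) ' ' :: acc)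
        = (fun acc k =>
            if k % 2 == 0 then acc ++ [rest.getD k ' '] else rest.getD k ' ' :: acc) := by
      funext acc k
      have h1k : (1 + (k : Int)) = ((k + 1 : Nat) : Int) := by push_cast; ring
      have hcond : (PySem.Int.mod (1 + (k : Int)) 2 == 1) = (k % 2 == 0) := by
        have hk : ((1 + (k : Int)) % 2 = 1) ↔ (k % 2 = 0) := by omega
        simp [hk]
      rw [hcond, h1k, PySem.List.pyGetD_natCast, List.getD_cons_succ]
    rw [hbody, pvLoopA rest [c0]]
    rw [pvEO_cons]
    simp [List.append_assoc]

-- ===== VERDICT =====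
theorem encrypted_string_spec : Claim_equal_encrypted_string := by
  intro strg _ hpre
  unfold Spec_encrypted_string
  apply pvMain
  intro hnil
  apply hpre
  cases strg
  simp_all
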